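-- pv_equiv track=rewrite | github.com/Kronten28/AlphaTeeko | alphateeko.py | _count_box
-- ===== SOURCE A (Python) =====
-- def _count_box(state, r, c, piece):
--     """ Helper to count pieces in a 2x2 box for the heuristic. """
--     count = 0
--     for i in range(2):
--         for j in range(2):
--             if state[r+i][c+j] == piece:
--                 count += 1
--             elif state[r+i][c+j] != ' ':
--                 return 0 # Blocked by opponent
--     return count
-- ===== SOURCE B (Python) =====
-- def _count_box(state, r, c, piece):
--     # Branchless arithmetic formulation: each cell scores 1 for a matching piece,
--     # 0 for a blank, and a -4 penalty for any blocker; a single blocker drives the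
--     # total below zero (at most 3 matches remain), so clamping at 0 yields the
--     # blocked result without any early return or separate blocker scan.
--     def score(x):
--         if x == piece:
--             return 1
--         if x == ' ':
--             return 0
--         return -4
--     total = (score(state[r][c]) + score(state[r][c + 1])
--              + score(state[r + 1][c]) + score(state[r + 1][c + 1]))
--     return max(total, 0)
-- ===== Notes on version B (the rewrite author's own statement) =====
-- stated objective: alternative
-- what changed: Replaces A's interleaved loop with count accumulator and early return on a blocker by a branchless arithmetic formulation: each of the four fully-unrolled cells maps to a score (+1 match, 0 blank, -4 blocker), and clamping the summed score at 0 makes any blocker yield 0 since one -4 penalty outweighs the at most 3 possible matches.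
-- outside the precondition, e.g. on _count_box([['O', '?']], 0, 0, 'X'): A returns 0, B raises IndexError
import Mathlib
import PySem

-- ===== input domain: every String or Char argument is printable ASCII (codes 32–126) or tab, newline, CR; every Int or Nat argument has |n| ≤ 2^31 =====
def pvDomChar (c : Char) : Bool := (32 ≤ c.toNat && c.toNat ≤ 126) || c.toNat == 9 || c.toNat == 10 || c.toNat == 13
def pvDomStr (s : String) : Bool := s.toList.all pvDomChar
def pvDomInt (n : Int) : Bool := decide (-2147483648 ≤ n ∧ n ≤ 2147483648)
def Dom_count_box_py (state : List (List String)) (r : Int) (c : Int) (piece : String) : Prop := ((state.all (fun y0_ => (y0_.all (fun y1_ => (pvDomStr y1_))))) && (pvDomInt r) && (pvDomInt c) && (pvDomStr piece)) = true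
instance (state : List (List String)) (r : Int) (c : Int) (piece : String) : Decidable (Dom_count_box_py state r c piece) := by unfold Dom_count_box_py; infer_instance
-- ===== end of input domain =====

-- B replaces A's interleaved count-and-early-return loop by a branchless arithmetic
-- formulation (per-cell score +1/0/-4, sum clamped at 0); objective: alternative.
-- Return-value equivalence only; neither mutates its arguments.

-- ===== PORT A =====
-- state[r+i][c+j]; the defaults are never used under Pre_count_box_py (all four accesses in range)
def pvCell (state : List (List String)) (r : Int) (c : Int) (i : Int) (j : Int) : String :=
  PySem.List.pyGetD (PySem.List.pyGetD state (r + i) []) (c + j) " "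

-- the nested 'for i in range(2): for j in range(2)' loop with count accumulator and early 'return 0'
def countBoxLoop (state : List (List String)) (r : Int) (c : Int) (piece : String) :
    List (Int × Int) → Int → Int
  | [], count => count
  | (i, j) :: rest, count =>
    if pvCell state r c i j = piece then countBoxLoop state r c piece rest (count + 1)
    else if pvCell state r c i j ≠ " " then 0
    else countBoxLoop state r c piece rest count

def count_box_py (state : List (List String)) (r : Int) (c : Int) (piece : String) : Int :=
  countBoxLoop state r c piece
    ((PySem.List.pyRange 0 2 1).flatMap (fun i => (PySem.List.pyRange 0 2 1).map (fun j => (i, j)))) 0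

-- ===== PORT B =====
-- per-cell score: +1 for a match, 0 for a blank, -4 for a blocker
def pvScore (piece : String) (x : String) : Int :=
  if x = piece then 1 else if x = " " then 0 else -4

def count_box_py_alt (state : List (List String)) (r : Int) (c : Int) (piece : String) : Int :=
  let total :=
    pvScore piece (PySem.List.pyGetD (PySem.List.pyGetD state r []) c " ")
    + pvScore piece (PySem.List.pyGetD (PySem.List.pyGetD state r []) (c + 1) " ")
    + pvScore piece (PySem.List.pyGetD (PySem.List.pyGetD state (r + 1) []) c " ")
    + pvScore piece (PySem.List.pyGetD (PySem.List.pyGetD state (r + 1) []) (c + 1) " ")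
  max total 0

-- ===== PRECONDITION & SPEC =====
-- Pre_ excludes inputs on which some of the four box accesses raises IndexError; on a few of
-- those A still returns 0 (an earlier cell is a blocker, so A never reaches the bad access)
-- while B evaluates every cell first and raises there.
def Pre_count_box_py (state : List (List String)) (r : Int) (c : Int) (piece : String) : Prop :=
  PySem.Raise.InRange state.length r ∧ PySem.Raise.InRange state.length (r + 1) ∧
  (∀ row ∈ (PySem.List.pyGet? state r).toList,
      PySem.Raise.InRange row.length c ∧ PySem.Raise.InRange row.length (c + 1)) ∧
  (∀ row ∈ (PySem.List.pyGet? state (r + 1)).toList,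
      PySem.Raise.InRange row.length c ∧ PySem.Raise.InRange row.length (c + 1))
instance (state : List (List String)) (r : Int) (c : Int) (piece : String) : Decidable (Pre_count_box_py state r c piece) := by unfold Pre_count_box_py; infer_instance

def pvWitness_count_box_py : List (List String) × Int × Int × String :=
  ([["X", "X"], ["X", " "]], 0, 0, "X")

def Spec_count_box_py (state : List (List String)) (r : Int) (c : Int) (piece : String) (out : Int) : Prop := out = count_box_py_alt state r c piece
instance (state : List (List String)) (r : Int) (c : Int) (piece : String) (out : Int) : Decidable (Spec_count_box_py state r c piece out) := by unfold Spec_count_box_py; infer_instance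

-- ===== CLAIM (what is proved, stated in full; the proofs are below) =====
def Claim_equal_count_box_py : Prop := ∀ (state : List (List String)) (r : Int) (c : Int) (piece : String), Dom_count_box_py state r c piece → Pre_count_box_py state r c piece → Spec_count_box_py state r c piece (count_box_py state r c piece)

-- ===== LEMMAS AND PROOFS =====

-- both programs as functions of the four (totalised) cell values: finite case bash
set_option maxHeartbeats 1600000 in
theorem count_box_eq_alt (state : List (List String)) (r : Int) (c : Int) (piece : String) :
    count_box_py state r c piece = count_box_py_alt state r c piece := by
  have hr : PySem.List.pyRange 0 2 1 = [(0 : Int), 1] := by decide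
  simp only [count_box_py, count_box_py_alt, hr, List.flatMap_cons, List.flatMap_nil,
    List.map_cons, List.map_nil, List.append_nil, List.cons_append, List.nil_append]
  simp only [countBoxLoop, pvCell, pvScore, add_zero]
  generalize PySem.List.pyGetD (PySem.List.pyGetD state r []) c " " = x1
  generalize PySem.List.pyGetD (PySem.List.pyGetD state r []) (c + 1) " " = x2
  generalize PySem.List.pyGetD (PySem.List.pyGetD state (r + 1) []) c " " = x3
  generalize PySem.List.pyGetD (PySem.List.pyGetD state (r + 1) []) (c + 1) " " = x4
  by_cases h1p : x1 = piece <;> by_cases h1s : x1 = " " <;>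
  by_cases h2p : x2 = piece <;> by_cases h2s : x2 = " " <;>
  by_cases h3p : x3 = piece <;> by_cases h3s : x3 = " " <;>
  by_cases h4p : x4 = piece <;> by_cases h4s : x4 = " " <;>
    simp_all

-- ===== VERDICT (by name: the statement is the Claim_ definition above) =====
theorem count_box_py_spec : Claim_equal_count_box_py := by
  intro state r c piece _ _
  unfold Spec_count_box_py
  exact count_box_eq_alt state r c piece
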